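-- pv_equiv track=rewrite | github.com/endomorphosis/ipfs_datasets_py | ipfs_datasets_py/optimizers/logic_theorem_optimizer/rag_integration.py | _generate_default_examples
-- ===== SOURCE A (Python) =====
-- from typing import List, Dict, Optional, Any, Tuple
--
-- def _generate_default_examples(query: str) -> List[Dict[str, str]]:
--     """Generate default few-shot examples based on query.
--
--     Args:
--         query: Query text
--
--     Returns:
--         List of default examples
--     """
--     # Detect query type and provide appropriate examples
--     examples = []
--
--     # Obligation examples
--     if any(word in query.lower() for word in ['must', 'shall', 'required', 'obligation']):
--         examples.append({
--             'input': 'All drivers must have a valid license.',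
--             'output': 'OBLIGATION(driver(X), have_license(X))',
--             'formalism': 'TDFOL'
--         })
--         examples.append({
--             'input': 'Tenants shall pay rent by the 1st of each month.',
--             'output': 'OBLIGATION(tenant(X), pay_rent_by(X, first_of_month))',
--             'formalism': 'TDFOL'
--         })
--
--     # Permission examples
--     if any(word in query.lower() for word in ['may', 'can', 'allowed', 'permission']):
--         examples.append({
--             'input': 'Employees may work from home on Fridays.',
--             'output': 'PERMISSION(employee(X), work_from_home(X, friday))',
--             'formalism': 'TDFOL'
--         })
--
--     # Prohibition examples
--     if any(word in query.lower() for word in ['must not', 'cannot', 'prohibited', 'forbidden']):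
--         examples.append({
--             'input': 'Students must not cheat on exams.',
--             'output': 'PROHIBITION(student(X), cheat_on_exam(X))',
--             'formalism': 'TDFOL'
--         })
--
--     # General FOL examples
--     if not examples:
--         examples.append({
--             'input': 'All humans are mortal.',
--             'output': 'FORALL x: human(x) -> mortal(x)',
--             'formalism': 'FOL'
--         })
--         examples.append({
--             'input': 'If it rains, the ground gets wet.',
--             'output': 'rains() -> wet(ground)',
--             'formalism': 'FOL'
--         })
--
--     return examples
-- ===== SOURCE B (Python) =====
-- _OBLIGATION = [
--     {'input': 'All drivers must have a valid license.',
--      'output': 'OBLIGATION(driver(X), have_license(X))',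
--      'formalism': 'TDFOL'},
--     {'input': 'Tenants shall pay rent by the 1st of each month.',
--      'output': 'OBLIGATION(tenant(X), pay_rent_by(X, first_of_month))',
--      'formalism': 'TDFOL'},
-- ]
-- _PERMISSION = [
--     {'input': 'Employees may work from home on Fridays.',
--      'output': 'PERMISSION(employee(X), work_from_home(X, friday))',
--      'formalism': 'TDFOL'},
-- ]
-- _PROHIBITION = [
--     {'input': 'Students must not cheat on exams.',
--      'output': 'PROHIBITION(student(X), cheat_on_exam(X))',
--      'formalism': 'TDFOL'},
-- ]
-- _FOL = [
--     {'input': 'All humans are mortal.',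
--      'output': 'FORALL x: human(x) -> mortal(x)',
--      'formalism': 'FOL'},
--     {'input': 'If it rains, the ground gets wet.',
--      'output': 'rains() -> wet(ground)',
--      'formalism': 'FOL'},
-- ]
--
-- # flat keyword -> bit map (bit 1 = obligation, 2 = permission, 4 = prohibition)
-- _KEYWORD_BITS = [
--     ('must', 1), ('shall', 1), ('required', 1), ('obligation', 1),
--     ('may', 2), ('can', 2), ('allowed', 2), ('permission', 2),
--     ('must not', 4), ('cannot', 4), ('prohibited', 4), ('forbidden', 4),
-- ]
--
-- # decode table: precompute the answer for every possible keyword mask (8 entries)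
-- _TABLE = []
-- for _mask in range(8):
--     _entry = []
--     if _mask & 1:
--         _entry += _OBLIGATION
--     if _mask & 2:
--         _entry += _PERMISSION
--     if _mask & 4:
--         _entry += _PROHIBITION
--     _TABLE.append(_entry or _FOL)
--
--
-- def _generate_default_examples(query):
--     """Generate default few-shot examples based on query (bitmask + decode table)."""
--     q = query.lower()
--     mask = 0
--     for kw, bit in _KEYWORD_BITS:
--         if kw in q:
--             mask |= bit
--     return list(_TABLE[mask])
-- ===== Notes on version B (the rewrite author's own statement) =====
-- stated objective: alternative
-- what changed: Replaces A's four if-branches (each re-lowering the query and appending) by one pass over a flat keyword->bit map building a 3-bit mask, then a single lookup in a precomputed 8-entry decode table (fallback baked into entry 0).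
import Mathlib
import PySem

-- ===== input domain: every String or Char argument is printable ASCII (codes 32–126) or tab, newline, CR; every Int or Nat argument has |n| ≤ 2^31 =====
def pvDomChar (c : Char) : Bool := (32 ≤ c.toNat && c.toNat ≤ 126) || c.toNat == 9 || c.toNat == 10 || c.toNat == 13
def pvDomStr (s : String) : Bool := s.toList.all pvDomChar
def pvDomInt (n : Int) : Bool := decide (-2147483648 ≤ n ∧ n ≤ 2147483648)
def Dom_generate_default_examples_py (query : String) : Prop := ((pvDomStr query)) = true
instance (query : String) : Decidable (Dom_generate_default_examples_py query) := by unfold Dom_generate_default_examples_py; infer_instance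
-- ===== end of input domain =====

-- B replaces A's four if-branches by one pass building a 3-bit keyword mask plus a lookup in a
-- precomputed 8-entry decode table (objective: alternative); return values are identical.

-- ===== PORT A =====
-- The example dicts, as association lists (insertion order).
def pvExObl1 : List (String × String) :=
  [("input", "All drivers must have a valid license."),
   ("output", "OBLIGATION(driver(X), have_license(X))"),
   ("formalism", "TDFOL")]
def pvExObl2 : List (String × String) :=
  [("input", "Tenants shall pay rent by the 1st of each month."),
   ("output", "OBLIGATION(tenant(X), pay_rent_by(X, first_of_month))"),
   ("formalism", "TDFOL")]
def pvExPerm : List (String × String) :=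
  [("input", "Employees may work from home on Fridays."),
   ("output", "PERMISSION(employee(X), work_from_home(X, friday))"),
   ("formalism", "TDFOL")]
def pvExProh : List (String × String) :=
  [("input", "Students must not cheat on exams."),
   ("output", "PROHIBITION(student(X), cheat_on_exam(X))"),
   ("formalism", "TDFOL")]
def pvExFol1 : List (String × String) :=
  [("input", "All humans are mortal."),
   ("output", "FORALL x: human(x) -> mortal(x)"),
   ("formalism", "FOL")]
def pvExFol2 : List (String × String) :=
  [("input", "If it rains, the ground gets wet."),
   ("output", "rains() -> wet(ground)"),
   ("formalism", "FOL")]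

def generate_default_examples_py (query : String) : List (List (String × String)) :=
  let examples : List (List (String × String)) := []
  -- if any(word in query.lower() for word in [...]): examples.append(...); examples.append(...)
  let examples :=
    if ["must", "shall", "required", "obligation"].any
        (fun w => PySem.Str.isIn w (PySem.Str.lower query)) then
      examples ++ [pvExObl1] ++ [pvExObl2]
    else examples
  let examples :=
    if ["may", "can", "allowed", "permission"].any
        (fun w => PySem.Str.isIn w (PySem.Str.lower query)) then
      examples ++ [pvExPerm]
    else examples
  let examples :=
    if ["must not", "cannot", "prohibited", "forbidden"].any
        (fun w => PySem.Str.isIn w (PySem.Str.lower query)) then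
      examples ++ [pvExProh]
    else examples
  let examples :=
    if examples.isEmpty then examples ++ [pvExFol1] ++ [pvExFol2] else examples
  examples

-- ===== PORT B =====
def pvObligation : List (List (String × String)) := [pvExObl1, pvExObl2]
def pvPermission : List (List (String × String)) := [pvExPerm]
def pvProhibition : List (List (String × String)) := [pvExProh]
def pvFol : List (List (String × String)) := [pvExFol1, pvExFol2]

-- flat keyword -> bit map (bit 1 = obligation, 2 = permission, 4 = prohibition)
def pvKeywordBits : List (String × Nat) :=
  [("must", 1), ("shall", 1), ("required", 1), ("obligation", 1),
   ("may", 2), ("can", 2), ("allowed", 2), ("permission", 2),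
   ("must not", 4), ("cannot", 4), ("prohibited", 4), ("forbidden", 4)]

-- decode table: the answer for every possible keyword mask (8 entries), as in Source B's module-level loop
def pvTable : List (List (List (String × String))) :=
  (List.range 8).map (fun mask =>
    let entry : List (List (String × String)) := []
    let entry := if mask &&& 1 ≠ 0 then entry ++ pvObligation else entry
    let entry := if mask &&& 2 ≠ 0 then entry ++ pvPermission else entry
    let entry := if mask &&& 4 ≠ 0 then entry ++ pvProhibition else entry
    if entry.isEmpty then pvFol else entry)

def generate_default_examples_py_alt (query : String) : List (List (String × String)) :=
  let q := PySem.Str.lower query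
  let mask :=
    pvKeywordBits.foldl
      (fun m kb => if PySem.Str.isIn kb.1 q then m ||| kb.2 else m) 0
  pvTable.getD mask []

-- ===== PRECONDITION & SPEC =====
def Spec_generate_default_examples_py (query : String) (out : List (List (String × String))) : Prop := out = generate_default_examples_py_alt query
instance (query : String) (out : List (List (String × String))) : Decidable (Spec_generate_default_examples_py query out) := by unfold Spec_generate_default_examples_py; infer_instance

-- ===== CLAIM (what is proved, stated in full; the proofs are below) =====
def Claim_equal_generate_default_examples_py : Prop := ∀ (query : String), Dom_generate_default_examples_py query → Spec_generate_default_examples_py query (generate_default_examples_py query)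

-- ===== LEMMAS AND PROOFS =====

-- folding a run of keywords that all carry the same bit ORs that bit in iff any keyword matches
theorem pv_fold_bit (q : String) (ks : List String) (b m : Nat) :
    List.foldl (fun m' (kb : String × Nat) => if PySem.Str.isIn kb.1 q then m' ||| kb.2 else m') m
      (ks.map (fun k => (k, b)))
    = if ks.any (fun k => PySem.Str.isIn k q) then m ||| b else m := by
  induction ks generalizing m with
  | nil => simp
  | cons k rest ih =>
    simp only [List.map, List.foldl, List.any_cons]
    by_cases h : PySem.Str.isIn k q = true
    · rw [if_pos h, ih]
      simp only [h, Bool.true_or, if_true]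
      split_ifs with h2
      · rw [Nat.or_assoc, Nat.or_self]
      · rfl
    · rw [if_neg h, ih]
      have h' : PySem.Chars.isIn k.toList q.toList = false := by
        simpa [PySem.Str.isIn] using h
      simp [h']

-- ===== VERDICT (by name: the statement is the Claim_ definition above) =====
theorem generate_default_examples_py_spec : Claim_equal_generate_default_examples_py := by
  intro query _
  unfold Spec_generate_default_examples_py generate_default_examples_py
    generate_default_examples_py_alt
  rw [show pvKeywordBits
      = (["must", "shall", "required", "obligation"].map (fun k => (k, 1)))
        ++ (["may", "can", "allowed", "permission"].map (fun k => (k, 2)))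
        ++ (["must not", "cannot", "prohibited", "forbidden"].map (fun k => (k, 4))) from rfl]
  dsimp only
  rw [List.foldl_append, List.foldl_append, pv_fold_bit, pv_fold_bit, pv_fold_bit]
  split_ifs <;> first | decide | simp_all
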